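-- pv_equiv track=rewrite | github.com/Chefmanaphy/chefmanaphy.github.io | projects/truth-table/main.py | boolFormula
-- ===== SOURCE A (Python) =====
-- def boolFormula(text):
--     while True:
--         test = False
--         for i in range(len(text)-1):
--             if (ord(text[i]) >=97 and ord(text[i])<123 and ord(text[i+1]) >=97 and ord(text[i+1])<123):
--                 text = text[:i+1]+"."+text[i+1:]
--                 test = True
--         if test == False:
--             break
--     text = text.replace("+"," or ")
--     text = text.replace("."," and ")
--     text = text.replace("!","not")
--     text = "Y = "+text
--     return text
-- ===== SOURCE B (Python) =====
-- def boolFormula(text):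
--     # single left-to-right pass: emit a '.' between each adjacent pair of lowercase letters
--     chars = []
--     prev = None
--     for ch in text:
--         if prev is not None and 'a' <= prev <= 'z' and 'a' <= ch <= 'z':
--             chars.append('.')
--         chars.append(ch)
--         prev = ch
--     text = ''.join(chars)
--     text = text.replace("+", " or ")
--     text = text.replace(".", " and ")
--     text = text.replace("!", "not")
--     return "Y = " + text
-- ===== Notes on version B (the rewrite author's own statement) =====
-- stated objective: faster
-- what changed: Replaces A's fixed-point rescan loop (repeatedly rescanning and slicing the growing string until a pass inserts nothing) with a single left-to-right pass that emits a dot between each adjacent lowercase pair; the replace chain is unchanged.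
import Mathlib
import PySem

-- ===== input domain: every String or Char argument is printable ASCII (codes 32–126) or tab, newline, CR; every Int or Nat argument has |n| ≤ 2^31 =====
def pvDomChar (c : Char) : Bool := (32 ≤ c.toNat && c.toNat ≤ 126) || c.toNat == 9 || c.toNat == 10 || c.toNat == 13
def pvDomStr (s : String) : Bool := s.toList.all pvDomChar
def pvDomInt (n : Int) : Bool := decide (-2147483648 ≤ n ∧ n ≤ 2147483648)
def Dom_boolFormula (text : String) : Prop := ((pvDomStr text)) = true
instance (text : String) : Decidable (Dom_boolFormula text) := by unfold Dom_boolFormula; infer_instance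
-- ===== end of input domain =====

-- B replaces A's fixed-point rescan-and-insert loop by one linear pass; return values proved equal.

-- ===== PORT A =====
-- `ord(c) >= 97 and ord(c) < 123`
def pvLower (c : Char) : Bool := 97 ≤ c.toNat && c.toNat < 123

-- one step of `for i in range(len(text)-1)`: test the pair at i, maybe insert "."
def pvPassStep (st : List Char × Bool) (i : Nat) : List Char × Bool :=
  if pvLower (st.1.getD i ' ') && pvLower (st.1.getD (i+1) ' ') then
    (st.1.take (i+1) ++ '.' :: st.1.drop (i+1), true)
  else st

-- one iteration of the `while True` body: the whole `for` loop, `test` starting False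
def pvPass (t : List Char) : List Char × Bool :=
  (List.range (t.length - 1)).foldl pvPassStep (t, false)

-- the `while True` loop; the fuel only makes it total (length+1 passes always suffice, see proofs)
def pvWhile : Nat → List Char → List Char
  | 0, t => t
  | fuel+1, t => if (pvPass t).2 then pvWhile fuel (pvPass t).1 else (pvPass t).1

-- the three `.replace` calls and the `"Y = "` prefix, in A's order
def boolFormula (text : String) : String :=
  "Y = " ++ PySem.Str.replace (PySem.Str.replace (PySem.Str.replace
    (String.ofList (pvWhile (text.toList.length + 1) text.toList)) "+" " or ") "." " and ") "!" "not"

-- ===== PORT B =====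
-- `prev is not None and 'a' <= prev <= 'z' and 'a' <= ch <= 'z'`
def pvPrevPair (prev : Option Char) (ch : Char) : Bool :=
  match prev with
  | some p => decide (('a' ≤ p ∧ p ≤ 'z') ∧ ('a' ≤ ch ∧ ch ≤ 'z'))
  | none => false

-- loop body: maybe `chars.append('.')`, then `chars.append(ch)`, `prev = ch`
def pvStepB (st : List Char × Option Char) (ch : Char) : List Char × Option Char :=
  ((if pvPrevPair st.2 ch then st.1 ++ ['.'] else st.1) ++ [ch], some ch)

-- the single pass, then the same three `.replace` calls and prefix as in A
def boolFormula_alt (text : String) : String :=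
  "Y = " ++ PySem.Str.replace (PySem.Str.replace (PySem.Str.replace
    (String.ofList (text.toList.foldl pvStepB ([], none)).1) "+" " or ") "." " and ") "!" "not"

-- ===== PRECONDITION & SPEC =====
def Spec_boolFormula (text : String) (out : String) : Prop := out = boolFormula_alt text
instance (text : String) (out : String) : Decidable (Spec_boolFormula text out) := by unfold Spec_boolFormula; infer_instance

-- ===== CLAIM (what is proved, stated in full; the proofs are below) =====
def Claim_equal_boolFormula : Prop := ∀ (text : String), Dom_boolFormula text → Spec_boolFormula text (boolFormula text)

-- ===== LEMMAS AND PROOFS =====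

-- the common value: '.' inserted between every adjacent lowercase pair
def pvDot : List Char → List Char
  | [] => []
  | [c] => [c]
  | c :: d :: r => if pvLower c && pvLower d then c :: '.' :: pvDot (d :: r) else c :: pvDot (d :: r)

def pvPairs : List Char → Nat
  | [] => 0
  | [_] => 0
  | c :: d :: r => (if pvLower c && pvLower d then 1 else 0) + pvPairs (d :: r)

lemma pvLower_iff (c : Char) : pvLower c = true ↔ ('a' ≤ c ∧ c ≤ 'z') := by
  have ha : 'a'.val.toNat = 97 := rfl
  have hz : 'z'.val.toNat = 122 := rfl
  have hc : c.toNat = c.val.toNat := rfl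
  simp only [pvLower, Bool.and_eq_true, decide_eq_true_eq, Char.le_def, UInt32.le_iff_toNat_le]
  omega

lemma pvLower_dot : pvLower '.' = false := by decide

lemma pvLower_space : pvLower ' ' = false := by decide

lemma pvDot_insert (u v : List Char) (c d : Char) (hc : pvLower c) (hd : pvLower d) :
    pvDot (u ++ c :: '.' :: d :: v) = pvDot (u ++ c :: d :: v) := by
  induction u with
  | nil => simp [pvDot, hc, hd, pvLower_dot]
  | cons a u ih =>
      cases u with
      | nil => simp only [List.nil_append, List.cons_append, pvDot] at *; rw [ih]
      | cons b u' => simp only [List.cons_append, pvDot] at *; rw [ih]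

lemma pvPairs_insert (u v : List Char) (c d : Char) (hc : pvLower c) (hd : pvLower d) :
    pvPairs (u ++ c :: '.' :: d :: v) + 1 = pvPairs (u ++ c :: d :: v) := by
  induction u with
  | nil => simp [pvPairs, hc, hd, pvLower_dot]; omega
  | cons a u ih =>
      cases u with
      | nil => simp only [List.nil_append, List.cons_append, pvPairs] at *; omega
      | cons b u' => simp only [List.cons_append, pvPairs] at *; omega

lemma pvPairs_le (t : List Char) : pvPairs t ≤ t.length := by
  induction t with
  | nil => simp [pvPairs]
  | cons c r ih =>
      cases r with
      | nil => simp [pvPairs]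
      | cons d r' =>
          simp only [pvPairs, List.length_cons] at *
          split <;> omega

lemma pvDot_of_pairs_zero (t : List Char) (h : pvPairs t = 0) : pvDot t = t := by
  induction t with
  | nil => simp [pvDot]
  | cons c r ih =>
      cases r with
      | nil => simp [pvDot]
      | cons d r' =>
          simp only [pvPairs] at h
          simp only [pvDot]
          have h2 : pvPairs (d :: r') = 0 := by omega
          have h3 : ¬ (pvLower c && pvLower d) = true := by
            intro hb; simp [hb] at h
          simp [h3, ih h2]

-- the condition A tests at index i
def pvCond (t : List Char) (i : Nat) : Bool :=
  pvLower (t.getD i ' ') && pvLower (t.getD (i+1) ' ')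

lemma pvCond_decomp (t : List Char) (i : Nat) (h : pvCond t i = true) :
    ∃ u v c d, t = u ++ c :: d :: v ∧ u.length = i ∧ pvLower c = true ∧ pvLower d = true ∧
      t.take (i+1) ++ '.' :: t.drop (i+1) = u ++ c :: '.' :: d :: v := by
  have hi1 : i + 1 < t.length := by
    by_contra hge
    have hn : t[i+1]? = none := List.getElem?_eq_none (by omega)
    simp only [pvCond, Bool.and_eq_true, List.getD_eq_getElem?_getD, hn, Option.getD_none,
      pvLower_space] at h
    exact absurd h.2 (by simp)
  have hi : i < t.length := by omega
  have hgi : t[i]? = some t[i] := List.getElem?_eq_getElem hi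
  have hgi1 : t[i+1]? = some t[i+1] := List.getElem?_eq_getElem hi1
  simp only [pvCond, Bool.and_eq_true, List.getD_eq_getElem?_getD, hgi, hgi1,
    Option.getD_some] at h
  refine ⟨t.take i, t.drop (i+2), t[i], t[i+1], ?_, ?_, h.1, h.2, ?_⟩
  · rw [← List.drop_eq_getElem_cons (by omega), ← List.drop_eq_getElem_cons hi,
        List.take_append_drop]
  · simp [List.length_take]; omega
  · have ht : List.take (i+1) t = List.take i t ++ [t[i]] := by
      rw [List.take_add_one, hgi]; rfl
    rw [ht, List.append_assoc, List.drop_eq_getElem_cons (l := t) (i := i+1) hi1]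
    exact rfl

-- invariant of one pass of the inner for loop
lemma pvPass_fold_inv (t : List Char) (is : List Nat) (st : List Char × Bool)
    (h1 : pvDot st.1 = pvDot t) (h2 : st.2 = true → pvPairs st.1 < pvPairs t)
    (h3 : st.2 = false → st.1 = t) :
    pvDot (is.foldl pvPassStep st).1 = pvDot t ∧
    ((is.foldl pvPassStep st).2 = true → pvPairs (is.foldl pvPassStep st).1 < pvPairs t) := by
  induction is generalizing st with
  | nil => exact ⟨h1, h2⟩
  | cons i is ih =>
      simp only [List.foldl_cons]
      by_cases hc : pvCond st.1 i = true
      · obtain ⟨u, v, c, d, hdec, _, hlc, hld, hins⟩ := pvCond_decomp st.1 i hc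
        have hstep : pvPassStep st i =
            (st.1.take (i+1) ++ '.' :: st.1.drop (i+1), true) := by
          simp only [pvPassStep]
          rw [if_pos]
          simpa [pvCond] using hc
        rw [hstep]
        have hnewdot : pvDot (st.1.take (i+1) ++ '.' :: st.1.drop (i+1)) = pvDot t := by
          rw [hins, pvDot_insert u v c d hlc hld, ← hdec, h1]
        have hp : pvPairs (st.1.take (i+1) ++ '.' :: st.1.drop (i+1)) + 1 = pvPairs st.1 := by
          rw [hins, hdec]; exact pvPairs_insert u v c d hlc hld
        have hnewp : pvPairs (st.1.take (i+1) ++ '.' :: st.1.drop (i+1)) < pvPairs t := by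
          cases hb2 : st.2 with
          | true => have := h2 hb2; omega
          | false => rw [h3 hb2] at hp ⊢; omega
        exact ih _ hnewdot (fun _ => hnewp) (by intro hh; simp at hh)
      · have hstep : pvPassStep st i = st := by
          simp only [pvPassStep]
          rw [if_neg]
          simpa [pvCond] using hc
        rw [hstep]; exact ih _ h1 h2 h3

lemma pvPass_snd_mono (is : List Nat) (st : List Char × Bool) (h : st.2 = true) :
    (is.foldl pvPassStep st).2 = true := by
  induction is generalizing st with
  | nil => exact h
  | cons i is ih =>
      simp only [List.foldl_cons]
      apply ih
      simp only [pvPassStep]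
      split <;> simp [h]

lemma pvPass_false_conds (t : List Char) (is : List Nat)
    (h : (is.foldl pvPassStep (t, false)).2 = false) :
    ∀ i ∈ is, pvCond t i = false := by
  induction is with
  | nil => intro i hi; cases hi
  | cons i is ih =>
      simp only [List.foldl_cons] at h
      by_cases hc : pvCond t i = true
      · exfalso
        have hstep : pvPassStep (t, false) i =
            (t.take (i+1) ++ '.' :: t.drop (i+1), true) := by
          simp only [pvPassStep]
          rw [if_pos]
          simpa [pvCond] using hc
        rw [hstep] at h
        have hm := pvPass_snd_mono is (t.take (i+1) ++ '.' :: t.drop (i+1), true) rfl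
        rw [hm] at h; cases h
      · have hstep : pvPassStep (t, false) i = (t, false) := by
          simp only [pvPassStep]
          rw [if_neg]
          simpa [pvCond] using hc
        rw [hstep] at h
        intro j hj
        rcases List.mem_cons.mp hj with hj | hj
        · rw [hj]; simpa using hc
        · exact ih h j hj

lemma pvPass_false_fixed (t : List Char) (is : List Nat)
    (h : ∀ i ∈ is, pvCond t i = false) :
    is.foldl pvPassStep (t, false) = (t, false) := by
  induction is with
  | nil => rfl
  | cons i is ih =>
      simp only [List.foldl_cons]
      have hstep : pvPassStep (t, false) i = (t, false) := by
        simp only [pvPassStep]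
        rw [if_neg]
        simpa [pvCond] using h i (by simp)
      rw [hstep]
      exact ih (fun j hj => h j (by simp [hj]))

lemma pvCond_cons (a : Char) (t : List Char) (i : Nat) :
    pvCond (a :: t) (i+1) = pvCond t i := by
  simp [pvCond, List.getD]

lemma pvPairs_zero_of_conds (t : List Char)
    (h : ∀ i ∈ List.range (t.length - 1), pvCond t i = false) : pvPairs t = 0 := by
  induction t with
  | nil => simp [pvPairs]
  | cons c r ih =>
      cases r with
      | nil => simp [pvPairs]
      | cons d r' =>
          have h0 : pvCond (c :: d :: r') 0 = false := by
            apply h; simp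
          have hcd : ¬ (pvLower c && pvLower d) = true := by
            simpa [pvCond, List.getD] using h0
          have htail : pvPairs (d :: r') = 0 := by
            apply ih
            intro i hi
            rw [← pvCond_cons c]
            apply h
            simp at hi ⊢
            omega
          simp [pvPairs, hcd, htail]

lemma pvWhile_eq_dot (fuel : Nat) (t : List Char) (h : pvPairs t < fuel) :
    pvWhile fuel t = pvDot t := by
  induction fuel generalizing t with
  | zero => omega
  | succ n ih =>
      simp only [pvWhile]
      have hinv := pvPass_fold_inv t (List.range (t.length - 1)) (t, false) rfl
        (by intro hb; cases hb) (fun _ => rfl)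
      cases hb : (pvPass t).2 with
      | true =>
          rw [if_pos rfl]
          have hlt : pvPairs (pvPass t).1 < pvPairs t := hinv.2 hb
          rw [ih _ (by omega)]
          exact hinv.1
      | false =>
          rw [if_neg (by simp)]
          have hconds := pvPass_false_conds t _ (by simpa [pvPass] using hb)
          have hz := pvPairs_zero_of_conds t hconds
          have hfix : (pvPass t).1 = t := by
            simp only [pvPass]
            rw [pvPass_false_fixed t _ hconds]
          rw [hfix, pvDot_of_pairs_zero t hz]

-- B side: the single pass computes pvDot
def pvDotP : Option Char → List Char → List Char
  | _, [] => []
  | prev, c :: r => (if pvPrevPair prev c then ['.'] else []) ++ c :: pvDotP (some c) r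

lemma pvFoldB (l : List Char) : ∀ (acc : List Char) (prev : Option Char),
    (l.foldl pvStepB (acc, prev)).1 = acc ++ pvDotP prev l := by
  induction l with
  | nil => intro acc prev; simp [pvDotP]
  | cons c r ih =>
      intro acc prev
      simp only [List.foldl_cons, pvStepB, pvDotP]
      split
      · rw [ih]; simp
      · rw [ih]; simp

lemma pvPrevPair_some (p ch : Char) : pvPrevPair (some p) ch = (pvLower p && pvLower ch) := by
  cases hb : (pvLower p && pvLower ch) with
  | true =>
      simp only [Bool.and_eq_true] at hb
      simp only [pvPrevPair, decide_eq_true_eq]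
      exact ⟨(pvLower_iff p).1 hb.1, (pvLower_iff ch).1 hb.2⟩
  | false =>
      simp only [pvPrevPair, decide_eq_false_iff_not]
      intro hcon
      rw [(pvLower_iff p).2 hcon.1, (pvLower_iff ch).2 hcon.2] at hb
      cases hb

lemma pvDotP_some (r : List Char) : ∀ c, c :: pvDotP (some c) r = pvDot (c :: r) := by
  induction r with
  | nil => intro c; simp [pvDotP, pvDot]
  | cons d r' ih =>
      intro c
      simp only [pvDotP, pvPrevPair_some]
      cases hcd : (pvLower c && pvLower d) with
      | true =>
          simp only [pvDot, hcd, if_true, ← ih d]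
          simp
      | false =>
          simp only [pvDot, hcd]
          rw [← ih d]
          simp

lemma pvDotP_none (l : List Char) : pvDotP none l = pvDot l := by
  cases l with
  | nil => simp [pvDotP, pvDot]
  | cons c r =>
      simp only [pvDotP, pvPrevPair, Bool.false_eq_true, if_false, List.nil_append]
      exact pvDotP_some r c

-- ===== VERDICT (by name: the statement is the Claim_ definition above) =====
theorem boolFormula_spec : Claim_equal_boolFormula := by
  intro text _
  unfold Spec_boolFormula boolFormula boolFormula_alt
  have hA : pvWhile (text.toList.length + 1) text.toList = pvDot text.toList :=
    pvWhile_eq_dot _ _ (by have := pvPairs_le text.toList; omega)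
  have hB : (text.toList.foldl pvStepB ([], none)).1 = pvDot text.toList := by
    rw [pvFoldB, pvDotP_none]; simp
  rw [hA, hB]
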